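-- pv_equiv track=rewrite | github.com/Abstractigakis/aoc-2022 | 8/a.py | checkVisibleTreesFromLeft
-- ===== SOURCE A (Python) =====
-- def checkVisibleTreesFromLeft(X):
--     visibleTrees = set()
--     for i in range(len(X)):
--         tallestTree = -1
--         for j in range(len(X[i])):
--             if X[i][j] > tallestTree:
--                 tallestTree = X[i][j]
--                 visibleTrees.add((i,j))
--     return visibleTrees
-- ===== SOURCE B (Python) =====
-- def checkVisibleTreesFromLeft(X):
--     return {(i, j)
--             for i, row in enumerate(X)
--             for j, x in enumerate(row)
--             if x > max([-1] + row[:j])}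
-- ===== Notes on version B (the rewrite author's own statement) =====
-- stated objective: alternative
-- what changed: Replaces the running-maximum accumulator double loop building a mutable set with a single set comprehension that decides each cell independently by comparing it against max([-1] + row-prefix).
import Mathlib
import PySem

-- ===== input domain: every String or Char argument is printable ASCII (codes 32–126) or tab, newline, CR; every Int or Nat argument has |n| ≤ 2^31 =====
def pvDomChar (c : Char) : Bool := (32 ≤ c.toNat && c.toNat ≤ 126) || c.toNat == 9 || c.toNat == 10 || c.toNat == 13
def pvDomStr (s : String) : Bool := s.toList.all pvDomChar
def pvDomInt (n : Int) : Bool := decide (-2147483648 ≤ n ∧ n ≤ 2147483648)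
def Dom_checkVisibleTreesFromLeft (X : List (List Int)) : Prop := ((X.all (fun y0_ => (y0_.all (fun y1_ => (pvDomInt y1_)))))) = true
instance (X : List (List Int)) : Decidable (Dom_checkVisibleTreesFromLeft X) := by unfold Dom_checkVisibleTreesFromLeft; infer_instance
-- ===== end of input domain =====

-- B replaces A's running-maximum accumulator loops with an independent per-cell
-- prefix-maximum comprehension (alternative decomposition, not faster).

-- ===== PORT A =====
def checkVisibleTreesFromLeft (X : List (List Int)) : List (Int × Int) :=
  (PySem.List.enumerate X).foldl
    (fun vs p =>
      ((PySem.List.enumerate p.2).foldl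
        (fun (st : Int × PySem.Set (Int × Int)) q =>
          if st.1 < q.2 then (q.2, PySem.Set.add st.2 (p.1, q.1)) else st)
        ((-1 : Int), vs)).2)
    PySem.Set.empty

-- ===== PORT B =====
def checkVisibleTreesFromLeft_alt (X : List (List Int)) : List (Int × Int) :=
  PySem.Set.ofList
    ((PySem.List.enumerate X).flatMap (fun p =>
      (PySem.List.enumerate p.2).filterMap (fun q =>
        if (PySem.List.max? ((-1) :: PySem.List.slice p.2 none (some q.1)) (fun y => y)).getD 0 < q.2
        then some (p.1, q.1) else none)))

-- ===== PRECONDITION & SPEC =====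
def Spec_checkVisibleTreesFromLeft (X : List (List Int)) (out : List (Int × Int)) : Prop := out = checkVisibleTreesFromLeft_alt X
instance (X : List (List Int)) (out : List (Int × Int)) : Decidable (Spec_checkVisibleTreesFromLeft X out) := by unfold Spec_checkVisibleTreesFromLeft; infer_instance

-- ===== CLAIM (what is proved, stated in full; the proofs are below) =====
def Claim_equal_checkVisibleTreesFromLeft : Prop := ∀ (X : List (List Int)), Dom_checkVisibleTreesFromLeft X → Spec_checkVisibleTreesFromLeft X (checkVisibleTreesFromLeft X)

-- ===== LEMMAS AND PROOFS =====

-- canonical per-row result: visible cells of row `suf` (indices from j), accumulator t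
def visRow (i t : Int) (suf : List Int) (j : Int) : List (Int × Int) :=
  match suf with
  | [] => []
  | x :: xs => if t < x then (i, j) :: visRow i x xs (j + 1) else visRow i t xs (j + 1)

lemma visRow_mem (i t : Int) : ∀ (suf : List Int) (j : Int) (q : Int × Int),
    q ∈ visRow i t suf j → q.1 = i ∧ j ≤ q.2 := by
  intro suf
  induction suf generalizing t with
  | nil => intro j q h; simp [visRow] at h
  | cons x xs ih =>
    intro j q h
    simp only [visRow] at h
    split at h
    · rcases List.mem_cons.mp h with h | h
      · subst h; exact ⟨rfl, le_refl _⟩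
      · have := ih x (j+1) q h; exact ⟨this.1, by omega⟩
    · have := ih t (j+1) q h; exact ⟨this.1, by omega⟩

lemma visRow_nodup (i t : Int) : ∀ (suf : List Int) (j : Int), (visRow i t suf j).Nodup := by
  intro suf
  induction suf generalizing t with
  | nil => intro j; simp [visRow]
  | cons x xs ih =>
    intro j
    simp only [visRow]
    split
    · refine List.nodup_cons.mpr ⟨?_, ih x (j+1)⟩
      intro hmem
      have := (visRow_mem i x xs (j+1) _ hmem).2
      omega
    · exact ih t (j+1)

-- A's inner loop = accumulator ++ visRow
lemma innerA (i : Int) : ∀ (suf : List Int) (n : Nat) (t : Int) (s : List (Int × Int)),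
    (∀ q ∈ s, q.1 ≠ i ∨ q.2 < (n : Int)) →
    ((PySem.List.enumerate suf (n : Int)).foldl
      (fun (st : Int × PySem.Set (Int × Int)) q =>
        if st.1 < q.2 then (q.2, PySem.Set.add st.2 (i, q.1)) else st)
      (t, s)).2
    = s ++ visRow i t suf (n : Int) := by
  intro suf
  induction suf with
  | nil => intro n t s h; simp [PySem.List.enumerate_nil, visRow]
  | cons x xs ih =>
    intro n t s h
    rw [PySem.List.enumerate_cons]
    simp only [List.foldl_cons]
    have hcast : ((n : Int) + 1) = (((n + 1 : Nat)) : Int) := by push_cast; ring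
    by_cases hx : t < x
    · have hnot : ((i, (n : Int)) : Int × Int) ∉ s := by
        intro hm
        rcases h _ hm with h1 | h1
        · exact h1 rfl
        · simp at h1
      have hadd : PySem.Set.add s (i, (n : Int)) = s ++ [(i, (n : Int))] := by
        simp [PySem.Set.add, PySem.Set.contains, hnot]
      rw [if_pos hx, hadd, hcast, ih (n + 1) x (s ++ [(i, (n : Int))]) ?_]
      · simp only [visRow, if_pos hx]
        push_cast
        simp
      · intro q hq
        rcases List.mem_append.mp hq with hq | hq
        · rcases h _ hq with h1 | h1
          · exact Or.inl h1
          · right; push_cast; omega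
        · simp at hq
          subst hq
          right; push_cast; omega
    · rw [if_neg hx, hcast, ih (n + 1) t s ?_]
      · simp only [visRow, if_neg hx]
        push_cast
        simp
      · intro q hq
        rcases h _ hq with h1 | h1
        · exact Or.inl h1
        · right; push_cast; omega

-- A's outer loop = accumulator ++ flatMap of visRow
lemma outerA : ∀ (rows : List (List Int)) (i0 : Nat) (s : List (Int × Int)),
    (∀ q ∈ s, q.1 < (i0 : Int)) →
    (PySem.List.enumerate rows (i0 : Int)).foldl
      (fun vs p =>
        ((PySem.List.enumerate p.2).foldl
          (fun (st : Int × PySem.Set (Int × Int)) q =>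
            if st.1 < q.2 then (q.2, PySem.Set.add st.2 (p.1, q.1)) else st)
          ((-1 : Int), vs)).2) s
    = s ++ (PySem.List.enumerate rows (i0 : Int)).flatMap (fun p => visRow p.1 (-1) p.2 0) := by
  intro rows
  induction rows with
  | nil => intro i0 s h; simp [PySem.List.enumerate_nil]
  | cons row rows ih =>
    intro i0 s h
    rw [PySem.List.enumerate_cons]
    simp only [List.foldl_cons, List.flatMap_cons]
    have hinner := innerA (i0 : Int) row 0 (-1) s (by
      intro q hq; exact Or.inl (by have := h q hq; omega))
    norm_num at hinner
    rw [hinner]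
    have hcast : ((i0 : Int) + 1) = (((i0 + 1 : Nat)) : Int) := by push_cast; ring
    rw [hcast, ih (i0 + 1) _ ?_]
    · simp
    · intro q hq
      rcases List.mem_append.mp hq with hq | hq
      · have := h q hq; push_cast; omega
      · have := (visRow_mem (i0 : Int) (-1) row 0 q hq).1; push_cast; omega

-- B's per-row comprehension = visRow
lemma bRow (i : Int) : ∀ (suf R : List Int) (n : Nat), R.drop n = suf →
    (PySem.List.enumerate suf (n : Int)).filterMap (fun q =>
      if (PySem.List.max? ((-1) :: PySem.List.slice R none (some q.1)) (fun y => y)).getD 0 < q.2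
      then some (i, q.1) else none)
    = visRow i ((R.take n).foldl max (-1)) suf (n : Int) := by
  intro suf
  induction suf with
  | nil => intro R n hdrop; simp [PySem.List.enumerate_nil, visRow]
  | cons x xs ih =>
    intro R n hdrop
    rw [PySem.List.enumerate_cons]
    have hxn : R[n]? = some x := by
      have h1 : (R.drop n).head? = some x := by rw [hdrop]; rfl
      rwa [List.head?_drop] at h1
    have htake : R.take (n + 1) = R.take n ++ [x] := by
      rw [List.take_add_one, hxn]; rfl
    have hdrop1 : R.drop (n + 1) = xs := by
      have h2 : (R.drop n).drop 1 = R.drop (n + 1) := by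
        rw [List.drop_drop]
      rw [← h2, hdrop]; rfl
    have hcast : ((n : Int) + 1) = (((n + 1 : Nat)) : Int) := by push_cast; ring
    have hfold : (R.take (n + 1)).foldl max (-1) = max ((R.take n).foldl max (-1)) x := by
      rw [htake, List.foldl_append]; rfl
    by_cases hx : (R.take n).foldl max (-1) < x
    · have hhead : (fun (q : Int × Int) =>
          if (PySem.List.max? ((-1) :: PySem.List.slice R none (some q.1)) (fun y => y)).getD 0 < q.2
          then some (i, q.1) else none) ((n : Int), x) = some (i, (n : Int)) := by
        simp only [PySem.List.slice_to_natCast, PySem.List.max?_id_cons, Option.getD_some]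
        rw [if_pos hx]
      rw [List.filterMap_cons_some (f := fun (q : Int × Int) => if (PySem.List.max? ((-1) :: PySem.List.slice R none (some q.1)) (fun y => y)).getD 0 < q.2 then some (i, q.1) else none) (h := hhead), hcast, ih R (n + 1) hdrop1, hfold,
        max_eq_right (le_of_lt hx)]
      simp only [visRow, if_pos hx]
      push_cast
      rfl
    · have hhead : (fun (q : Int × Int) =>
          if (PySem.List.max? ((-1) :: PySem.List.slice R none (some q.1)) (fun y => y)).getD 0 < q.2
          then some (i, q.1) else none) ((n : Int), x) = none := by
        simp only [PySem.List.slice_to_natCast, PySem.List.max?_id_cons, Option.getD_some]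
        rw [if_neg hx]
      rw [List.filterMap_cons_none (f := fun (q : Int × Int) => if (PySem.List.max? ((-1) :: PySem.List.slice R none (some q.1)) (fun y => y)).getD 0 < q.2 then some (i, q.1) else none) (h := hhead), hcast, ih R (n + 1) hdrop1, hfold,
        max_eq_left (not_lt.mp hx)]
      simp only [visRow, if_neg hx]
      push_cast
      rfl

lemma ofList_eq_self_aux {α : Type} [BEq α] [LawfulBEq α] :
    ∀ (l s : List α), (s ++ l).Nodup → l.foldl PySem.Set.add s = s ++ l := by
  intro l
  induction l with
  | nil => intro s _; simp
  | cons x xs ih =>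
    intro s h
    have hx : x ∉ s := by
      intro hx
      have := List.Nodup.sublist (by simp : (s ++ [x]).Sublist (s ++ x :: xs)) h
      simp [List.nodup_append] at this
      exact this.2 x hx rfl
    have hadd : PySem.Set.add s x = s ++ [x] := by
      simp [PySem.Set.add, PySem.Set.contains, hx]
    simp only [List.foldl_cons, hadd]
    rw [ih (s ++ [x]) (by simpa using h)]
    simp

lemma flat_fst : ∀ (rows : List (List Int)) (i0 : Nat) (q : Int × Int),
    q ∈ (PySem.List.enumerate rows (i0 : Int)).flatMap (fun p => visRow p.1 (-1) p.2 0) →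
    (i0 : Int) ≤ q.1 := by
  intro rows
  induction rows with
  | nil => intro i0 q h; simp [PySem.List.enumerate_nil] at h
  | cons row rows ih =>
    intro i0 q h
    rw [PySem.List.enumerate_cons] at h
    simp only [List.flatMap_cons] at h
    rcases List.mem_append.mp h with h | h
    · rw [(visRow_mem (i0 : Int) (-1) row 0 q h).1]
    · have hcast : ((i0 : Int) + 1) = (((i0 + 1 : Nat)) : Int) := by push_cast; ring
      rw [hcast] at h
      have := ih (i0 + 1) q h
      push_cast at this ⊢
      omega

lemma flat_nodup : ∀ (rows : List (List Int)) (i0 : Nat),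
    ((PySem.List.enumerate rows (i0 : Int)).flatMap (fun p => visRow p.1 (-1) p.2 0)).Nodup := by
  intro rows
  induction rows with
  | nil => intro i0; simp [PySem.List.enumerate_nil]
  | cons row rows ih =>
    intro i0
    rw [PySem.List.enumerate_cons]
    simp only [List.flatMap_cons]
    have hcast : ((i0 : Int) + 1) = (((i0 + 1 : Nat)) : Int) := by push_cast; ring
    rw [hcast]
    refine List.nodup_append.mpr ⟨visRow_nodup _ _ _ _, ih (i0 + 1), ?_⟩
    intro q hq q2 hq2 hne
    subst hne
    have h1 := (visRow_mem (i0 : Int) (-1) row 0 q hq).1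
    have h2 := flat_fst rows (i0 + 1) q hq2
    push_cast at h2
    omega

-- ===== VERDICT (by name: the statement is the Claim_ definition above) =====
theorem checkVisibleTreesFromLeft_spec : Claim_equal_checkVisibleTreesFromLeft := by
  intro X _
  unfold Spec_checkVisibleTreesFromLeft checkVisibleTreesFromLeft checkVisibleTreesFromLeft_alt
  have houter := outerA X 0 [] (by intro q hq; simp at hq)
  norm_num at houter
  rw [show (PySem.Set.empty : PySem.Set (Int × Int)) = [] from rfl] at *
  rw [houter]
  have hfg : ∀ p ∈ PySem.List.enumerate X (0 : Int),
      (PySem.List.enumerate p.2 (0 : Int)).filterMap (fun q =>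
        if (PySem.List.max? ((-1) :: PySem.List.slice p.2 none (some q.1)) (fun y => y)).getD 0 < q.2
        then some (p.1, q.1) else none)
      = visRow p.1 (-1) p.2 0 := by
    intro p _
    have := bRow p.1 p.2 p.2 0 rfl
    norm_num at this
    exact this
  have hmap : (PySem.List.enumerate X (0 : Int)).map (fun p =>
      (PySem.List.enumerate p.2 (0 : Int)).filterMap (fun q =>
        if (PySem.List.max? ((-1) :: PySem.List.slice p.2 none (some q.1)) (fun y => y)).getD 0 < q.2
        then some (p.1, q.1) else none))
      = (PySem.List.enumerate X (0 : Int)).map (fun p => visRow p.1 (-1) p.2 0) :=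
    List.map_congr_left hfg
  have hflat : (PySem.List.enumerate X (0 : Int)).flatMap (fun p =>
      (PySem.List.enumerate p.2 (0 : Int)).filterMap (fun q =>
        if (PySem.List.max? ((-1) :: PySem.List.slice p.2 none (some q.1)) (fun y => y)).getD 0 < q.2
        then some (p.1, q.1) else none))
      = (PySem.List.enumerate X (0 : Int)).flatMap (fun p => visRow p.1 (-1) p.2 0) := by
    rw [List.flatMap_def, List.flatMap_def, hmap]
  rw [hflat]
  have hnd := flat_nodup X 0
  norm_num at hnd
  rw [PySem.Set.ofList_eq_foldl]
  have hself := ofList_eq_self_aux ((PySem.List.enumerate X (0 : Int)).flatMap (fun p => visRow p.1 (-1) p.2 0)) [] (by simpa using hnd)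
  simp at hself
  exact hself.symm
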